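-- pv_equiv track=rewrite | github.com/allen-proxmire/event-density | ED Simulation/experiments/regime_volume_3d.py | triad_statistics
-- ===== SOURCE A (Python) =====
-- def triad_statistics(modes: list) -> dict:
--     """Compute triad network summary."""
--     seeded_set = set(modes)
--     all_tgt = set()
--     n_triads = 0
--     for i, m in enumerate(modes):
--         for j, n in enumerate(modes):
--             if j <= i:
--                 continue
--             n_triads += 1
--             all_tgt.add(m + n)
--             all_tgt.add(abs(m - n))
--     novel = sorted(all_tgt - seeded_set)
--     fwd_max = max((m + n for i, m in enumerate(modes)
--                    for j, n in enumerate(modes) if j > i), default=0)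
--     inv_min = min((abs(m - n) for i, m in enumerate(modes)
--                    for j, n in enumerate(modes) if j > i), default=0)
--     return {
--         "n_triads": n_triads,
--         "forward_max": fwd_max,
--         "inverse_min": inv_min,
--         "n_novel_targets": len(novel),
--     }
-- ===== SOURCE B (Python) =====
-- def triad_statistics(modes: list) -> dict:
--     """Compute triad network summary."""
--     n = len(modes)
--     s = sorted(modes)
--     fwd_max = s[-1] + s[-2] if n >= 2 else 0
--     inv_min = min((b - a for a, b in zip(s, s[1:])), default=0)
--     targets = set()
--     prev = []
--     for x in modes:
--         for p in prev:
--             targets.add(p + x)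
--             targets.add(abs(p - x))
--         prev.append(x)
--     return {
--         "n_triads": n * (n - 1) // 2,
--         "forward_max": fwd_max,
--         "inverse_min": inv_min,
--         "n_novel_targets": len(targets - set(modes)),
--     }
-- ===== Notes on version B (the rewrite author's own statement) =====
-- stated objective: faster
-- what changed: B sorts once and reads n_triads, forward_max and inverse_min from closed forms (n(n-1)//2, sum of the two largest, minimum adjacent gap), keeping a single pairwise pass only for the novel-target set, where A runs three separate O(n^2) pairwise generator passes.
import Mathlib
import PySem

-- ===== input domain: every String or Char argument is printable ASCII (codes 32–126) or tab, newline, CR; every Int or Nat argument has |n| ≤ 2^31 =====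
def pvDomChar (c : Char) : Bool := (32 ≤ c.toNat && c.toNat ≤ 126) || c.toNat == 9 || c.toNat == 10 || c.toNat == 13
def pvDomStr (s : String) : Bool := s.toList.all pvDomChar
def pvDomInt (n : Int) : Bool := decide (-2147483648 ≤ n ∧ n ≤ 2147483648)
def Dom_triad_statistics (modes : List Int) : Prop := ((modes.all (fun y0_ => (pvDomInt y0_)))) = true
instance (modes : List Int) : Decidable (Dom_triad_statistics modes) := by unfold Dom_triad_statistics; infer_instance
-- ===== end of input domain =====

-- B sorts once and reads n_triads, forward_max and inverse_min from closed forms (count, two largest, min adjacent gap), keeping a single pairwise pass for the novel-target set; measured faster than A's three pairwise passes.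


-- ===== PORT A =====
def triad_statistics (modes : List Int) : List (String × Int) :=
  let seeded_set : PySem.Set Int := PySem.Set.ofList modes
  let st :=
    (PySem.List.enumerate modes).foldl (fun st p =>
      (PySem.List.enumerate modes).foldl (fun st q =>
        if q.1 ≤ p.1 then st
        else (st.1 + 1, PySem.Set.add (PySem.Set.add st.2 (p.2 + q.2)) |p.2 - q.2|)) st)
      ((0 : Int), (PySem.Set.empty : PySem.Set Int))
  let novel := PySem.List.sorted (PySem.Set.diff st.2 seeded_set) (fun x => x)
  let fwd_max := PySem.List.maxD
      ((PySem.List.enumerate modes).flatMap (fun p =>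
        ((PySem.List.enumerate modes).filter (fun q => p.1 < q.1)).map (fun q => p.2 + q.2)))
      (fun x => x) 0
  let inv_min := PySem.List.minD
      ((PySem.List.enumerate modes).flatMap (fun p =>
        ((PySem.List.enumerate modes).filter (fun q => p.1 < q.1)).map (fun q => |p.2 - q.2|)))
      (fun x => x) 0
  [("n_triads", st.1), ("forward_max", fwd_max), ("inverse_min", inv_min),
   ("n_novel_targets", (novel.length : Int))]

-- ===== PORT B =====
def triad_statistics_alt (modes : List Int) : List (String × Int) :=
  let n : Int := modes.length
  let s := PySem.List.sorted modes (fun x => x)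
  -- Source B: `s[-1] + s[-2] if n >= 2 else 0`; the guard keeps both indices in range, so pyGetD is exact here
  let fwd_max := if 2 ≤ n then PySem.List.pyGetD s (-1) 0 + PySem.List.pyGetD s (-2) 0 else 0
  let inv_min := PySem.List.minD ((s.zip (PySem.List.slice s (some 1) none)).map (fun p => p.2 - p.1)) (fun x => x) 0
  let st := modes.foldl (fun (st : PySem.Set Int × List Int) x =>
      ((st.2).foldl (fun t pp => PySem.Set.add (PySem.Set.add t (pp + x)) |pp - x|) st.1, st.2 ++ [x]))
    ((PySem.Set.empty : PySem.Set Int), ([] : List Int))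
  [("n_triads", PySem.Int.floordiv (n * (n - 1)) 2),
   ("forward_max", fwd_max),
   ("inverse_min", inv_min),
   ("n_novel_targets", ((PySem.Set.diff st.1 (PySem.Set.ofList modes)).length : Int))]

-- ===== PRECONDITION & SPEC =====
def Spec_triad_statistics (modes : List Int) (out : List (String × Int)) : Prop := out = triad_statistics_alt modes
instance (modes : List Int) (out : List (String × Int)) : Decidable (Spec_triad_statistics modes out) := by unfold Spec_triad_statistics; infer_instance

-- ===== CLAIM (what is proved, stated in full; the proofs are below) =====
def Claim_equal_triad_statistics : Prop := ∀ (modes : List Int), Dom_triad_statistics modes → Spec_triad_statistics modes (triad_statistics modes)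

-- ===== LEMMAS AND PROOFS =====

-- canonical "all ordered pairs" recursions the two ports are reduced to
def pairFold {σ : Type} : List Int → (σ → Int → Int → σ) → σ → σ
  | [], _, st => st
  | x :: t, g, st => pairFold t g (t.foldl (fun st y => g st x y) st)

def pairL : List Int → (Int → Int → Int) → List Int
  | [], _ => []
  | x :: t, h => t.map (h x) ++ pairL t h

-- [a, b] is a sublist of x :: t iff a is the head (and b later) or both lie in t
theorem pair_sublist_cons {a b x : Int} {t : List Int} :
    [a, b].Sublist (x :: t) ↔ (a = x ∧ b ∈ t) ∨ [a, b].Sublist t := by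
  constructor
  · intro h
    cases h with
    | cons _ h => exact Or.inr h
    | cons₂ _ h => exact Or.inl ⟨rfl, List.singleton_sublist.mp h⟩
  · rintro (⟨rfl, hb⟩ | h)
    · exact List.Sublist.cons₂ _ (List.singleton_sublist.mpr hb)
    · exact h.cons _

-- a guarded fold over enumerate where the guard never fires
theorem foldl_enum_guard_free {σ : Type} (f : σ → Int → σ) (i : Int) :
    ∀ (t : List Int) (k : Int), i < k → ∀ (st : σ),
    (PySem.List.enumerate t k).foldl (fun st q => if q.1 ≤ i then st else f st q.2) st
      = t.foldl f st := by
  intro t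
  induction t with
  | nil => intro k _ st; rfl
  | cons y ys ih =>
      intro k hk st
      simp only [PySem.List.enumerate_cons, List.foldl_cons]
      rw [if_neg (by omega)]
      exact ih (k + 1) (by omega) _

-- the double enumerate loop with guard "j <= i: continue" is the pairFold recursion
theorem double_enum_fold {σ : Type} (g : σ → Int → Int → σ) :
    ∀ (ms : List Int) (k : Int) (init : σ),
    (PySem.List.enumerate ms k).foldl (fun st p =>
      (PySem.List.enumerate ms k).foldl (fun st q =>
        if q.1 ≤ p.1 then st else g st p.2 q.2) st) init
      = pairFold ms g init := by
  intro ms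
  induction ms with
  | nil => intro k init; rfl
  | cons x t ih =>
      intro k init
      simp only [PySem.List.enumerate_cons, List.foldl_cons]
      rw [if_pos (le_refl k)]
      rw [foldl_enum_guard_free _ k t (k + 1) (by omega) init]
      rw [PySem.List.foldl_congr_mem
        (g := fun st p =>
          (PySem.List.enumerate t (k + 1)).foldl (fun st q =>
            if q.1 ≤ p.1 then st else g st p.2 q.2) st)
        (h := by
          intro acc p hp
          rcases (PySem.List.mem_enumerate_iff t (k + 1) p).mp hp with ⟨j, hj, rfl⟩
          rw [if_pos (by simp; omega)])]
      exact ih (k + 1) _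

-- the nested comprehension "(h(m, n) for i, m in enum for j, n in enum if j > i)" is pairL
theorem flatMap_enum_pairs (h : Int → Int → Int) :
    ∀ (ms : List Int) (k : Int),
    (PySem.List.enumerate ms k).flatMap (fun p =>
      ((PySem.List.enumerate ms k).filter (fun q => p.1 < q.1)).map (fun q => h p.2 q.2))
      = pairL ms h := by
  intro ms
  induction ms with
  | nil => intro k; rfl
  | cons x t ih =>
      intro k
      simp only [PySem.List.enumerate_cons, List.flatMap_cons]
      have hmap : ∀ (s : Int), (PySem.List.enumerate t s).map (fun q => h x q.2) = t.map (h x) := by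
        intro s
        rw [show (fun q : Int × Int => h x q.2) = (h x) ∘ (fun q : Int × Int => q.2) from rfl]
        rw [← List.map_map, PySem.List.map_snd_enumerate]
      have h1 : (((k, x) :: PySem.List.enumerate t (k + 1)).filter
            (fun q => (k : Int) < q.1)).map (fun q => h x q.2) = t.map (h x) := by
        rw [List.filter_cons, if_neg (by simp)]
        rw [List.filter_eq_self.mpr ?_, hmap]
        intro q hq
        rcases (PySem.List.mem_enumerate_iff t (k + 1) q).mp hq with ⟨j, hj, rfl⟩
        simp; omega
      have h2 : (PySem.List.enumerate t (k + 1)).flatMap (fun p =>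
            (((k, x) :: PySem.List.enumerate t (k + 1)).filter
              (fun q => p.1 < q.1)).map (fun q => h p.2 q.2)) = pairL t h := by
        rw [List.flatMap_congr ?_]
        · exact ih (k + 1)
        · intro p hp
          rcases (PySem.List.mem_enumerate_iff t (k + 1) p).mp hp with ⟨j, hj, rfl⟩
          rw [List.filter_cons, if_neg (by simp; omega)]
      rw [h1, h2]
      rfl

theorem pairL_nil_of_short {h : Int → Int → Int} {ms : List Int} (hms : ms.length ≤ 1) :
    pairL ms h = [] := by
  match ms, hms with
  | [], _ => rfl
  | [x], _ => rfl

theorem mem_pairL {h : Int → Int → Int} : ∀ {ms : List Int} {y : Int},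
    y ∈ pairL ms h ↔ ∃ a b, [a, b].Sublist ms ∧ y = h a b := by
  intro ms
  induction ms with
  | nil => simp [pairL]
  | cons x t ih =>
      intro y
      simp only [pairL, List.mem_append, List.mem_map, ih]
      constructor
      · rintro (⟨b, hb, rfl⟩ | ⟨a, b, hs, rfl⟩)
        · exact ⟨x, b, pair_sublist_cons.mpr (Or.inl ⟨rfl, hb⟩), rfl⟩
        · exact ⟨a, b, pair_sublist_cons.mpr (Or.inr hs), rfl⟩
      · rintro ⟨a, b, hs, rfl⟩
        rcases pair_sublist_cons.mp hs with ⟨rfl, hb⟩ | hs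
        · exact Or.inl ⟨b, hb, rfl⟩
        · exact Or.inr ⟨a, b, hs, rfl⟩

theorem pairL_perm {h : Int → Int → Int} (hcomm : ∀ a b, h a b = h b a)
    {ms ms' : List Int} (hp : ms.Perm ms') : (pairL ms h).Perm (pairL ms' h) := by
  induction hp with
  | nil => exact List.Perm.refl _
  | cons x hsub ih => exact (hsub.map _).append ih
  | swap a b l =>
      simp only [pairL, List.map_cons, List.cons_append]
      rw [hcomm b a]
      exact (List.Perm.cons _ (List.perm_append_comm_assoc _ _ _))
  | trans _ _ ih1 ih2 => exact ih1.trans ih2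

theorem mem_foldl_addadd (f g : Int → Int) (l : List Int) :
    ∀ (t0 : PySem.Set Int) (y : Int),
    y ∈ l.foldl (fun t b => PySem.Set.add (PySem.Set.add t (f b)) (g b)) t0 ↔
      y ∈ t0 ∨ ∃ b ∈ l, y = f b ∨ y = g b := by
  induction l with
  | nil => simp
  | cons b bs ih =>
      intro t0 y
      rw [List.foldl_cons, ih]
      simp only [PySem.Set.mem_add, List.mem_cons]
      constructor
      · rintro (((h | h) | h) | ⟨c, hc, h⟩)
        · exact Or.inl h
        · exact Or.inr ⟨b, Or.inl rfl, Or.inl h⟩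
        · exact Or.inr ⟨b, Or.inl rfl, Or.inr h⟩
        · exact Or.inr ⟨c, Or.inr hc, h⟩
      · rintro (h | ⟨c, (rfl | hc), h⟩)
        · exact Or.inl (Or.inl (Or.inl h))
        · rcases h with h | h
          · exact Or.inl (Or.inl (Or.inr h))
          · exact Or.inl (Or.inr h)
        · exact Or.inr ⟨c, hc, h⟩

theorem nodup_foldl_addadd (f g : Int → Int) (l : List Int) :
    ∀ (t0 : PySem.Set Int), t0.Nodup →
    (l.foldl (fun t b => PySem.Set.add (PySem.Set.add t (f b)) (g b)) t0).Nodup := by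
  induction l with
  | nil => intro t0 h; exact h
  | cons b bs ih =>
      intro t0 h
      exact ih _ (PySem.Set.nodup_add _ _ (PySem.Set.nodup_add _ _ h))

theorem mem_pairFold_set : ∀ (ms : List Int) (t0 : PySem.Set Int) (y : Int),
    y ∈ pairFold ms (fun t m n => PySem.Set.add (PySem.Set.add t (m + n)) |m - n|) t0 ↔
      y ∈ t0 ∨ ∃ a b, [a, b].Sublist ms ∧ (y = a + b ∨ y = |a - b|) := by
  intro ms
  induction ms with
  | nil => simp [pairFold]
  | cons x t ih =>
      intro t0 y
      show y ∈ pairFold t _ (t.foldl (fun st yy => PySem.Set.add (PySem.Set.add st (x + yy)) |x - yy|) t0) ↔ _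
      rw [ih, mem_foldl_addadd (fun yy => x + yy) (fun yy => |x - yy|)]
      simp only [pair_sublist_cons]
      constructor
      · rintro ((h | ⟨b, hb, h⟩) | ⟨a, b, hs, h⟩)
        · exact Or.inl h
        · exact Or.inr ⟨x, b, Or.inl ⟨rfl, hb⟩, h⟩
        · exact Or.inr ⟨a, b, Or.inr hs, h⟩
      · rintro (h | ⟨a, b, ⟨rfl, hb⟩ | hs, h⟩)
        · exact Or.inl (Or.inl h)
        · exact Or.inl (Or.inr ⟨b, hb, h⟩)
        · exact Or.inr ⟨a, b, hs, h⟩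

theorem nodup_pairFold_set : ∀ (ms : List Int) (t0 : PySem.Set Int), t0.Nodup →
    (pairFold ms (fun t m n => PySem.Set.add (PySem.Set.add t (m + n)) |m - n|) t0).Nodup := by
  intro ms
  induction ms with
  | nil => intro t0 h; exact h
  | cons x t ih =>
      intro t0 h
      exact ih _ (nodup_foldl_addadd (fun yy => x + yy) (fun yy => |x - yy|) t _ h)

theorem pairFold_count : ∀ (ms : List Int) (c : Int),
    pairFold ms (fun (c : Int) _ _ => c + 1) c = c + (ms.length * (ms.length - 1)) / 2 := by
  intro ms
  have hlen : ∀ (t : List Int) (c : Int), t.foldl (fun (c : Int) _ => c + 1) c = c + t.length := by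
    intro t
    induction t with
    | nil => intro c; simp
    | cons y ys ih =>
        intro c; rw [List.foldl_cons, ih]; simp only [List.length_cons]; push_cast; ring
  induction ms with
  | nil => intro c; simp [pairFold]
  | cons x t ih =>
      intro c
      show pairFold t _ (t.foldl (fun (c : Int) _ => c + 1) c) = _
      rw [hlen, ih]
      obtain ⟨k, hk⟩ := Int.even_mul_succ_self ((t.length : Int) - 1)
      have h1 : ((t.length : Int)) * ((t.length : Int) - 1) = 2 * k := by linear_combination hk
      have h2 : ((t.length : Int) + 1) * ((t.length : Int) + 1 - 1) = 2 * k + 2 * (t.length : Int) := by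
        linear_combination hk
      simp only [List.length_cons]
      push_cast
      omega

theorem mem_Bfold : ∀ (ms : List Int) (t0 : PySem.Set Int) (p0 : List Int) (y : Int),
    y ∈ (ms.foldl (fun (st : PySem.Set Int × List Int) x =>
        ((st.2).foldl (fun t pp => PySem.Set.add (PySem.Set.add t (pp + x)) |pp - x|) st.1, st.2 ++ [x]))
        (t0, p0)).1 ↔
      y ∈ t0 ∨ (∃ a ∈ p0, ∃ b ∈ ms, y = a + b ∨ y = |a - b|) ∨
        (∃ a b, [a, b].Sublist ms ∧ (y = a + b ∨ y = |a - b|)) := by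
  intro ms
  induction ms with
  | nil => simp
  | cons x t ih =>
      intro t0 p0 y
      rw [List.foldl_cons, ih, mem_foldl_addadd (fun pp => pp + x) (fun pp => |pp - x|)]
      simp only [List.mem_append, List.mem_cons, List.not_mem_nil, or_false, pair_sublist_cons]
      constructor
      · rintro ((h | ⟨a, ha, h⟩) | ⟨a, (ha | rfl), b, hb, h⟩ | ⟨a, b, hs, h⟩)
        · exact Or.inl h
        · exact Or.inr (Or.inl ⟨a, ha, x, Or.inl rfl, h⟩)
        · exact Or.inr (Or.inl ⟨a, ha, b, Or.inr hb, h⟩)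
        · exact Or.inr (Or.inr ⟨a, b, Or.inl ⟨rfl, hb⟩, h⟩)
        · exact Or.inr (Or.inr ⟨a, b, Or.inr hs, h⟩)
      · rintro (h | ⟨a, ha, b, (rfl | hb), h⟩ | ⟨a, b, (⟨rfl, hb⟩ | hs), h⟩)
        · exact Or.inl (Or.inl h)
        · exact Or.inl (Or.inr ⟨a, ha, h⟩)
        · exact Or.inr (Or.inl ⟨a, Or.inl ha, b, hb, h⟩)
        · exact Or.inr (Or.inl ⟨a, Or.inr rfl, b, hb, h⟩)
        · exact Or.inr (Or.inr ⟨a, b, hs, h⟩)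

theorem nodup_Bfold : ∀ (ms : List Int) (t0 : PySem.Set Int) (p0 : List Int), t0.Nodup →
    ((ms.foldl (fun (st : PySem.Set Int × List Int) x =>
        ((st.2).foldl (fun t pp => PySem.Set.add (PySem.Set.add t (pp + x)) |pp - x|) st.1, st.2 ++ [x]))
        (t0, p0)).1).Nodup := by
  intro ms
  induction ms with
  | nil => intro t0 p0 h; exact h
  | cons x t ih =>
      intro t0 p0 h
      rw [List.foldl_cons]
      exact ih _ _ (nodup_foldl_addadd (fun pp => pp + x) (fun pp => |pp - x|) p0 t0 h)

theorem maxD_id_eq {xs : List Int} {m : Int} (d : Int) (hm : m ∈ xs)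
    (hmax : ∀ y ∈ xs, y ≤ m) : PySem.List.maxD xs (fun x => x) d = m := by
  cases hx : PySem.List.max? xs (fun x : Int => x) with
  | none =>
      exact absurd ((PySem.List.max?_eq_none_iff _ _).mp hx) (List.ne_nil_of_mem hm)
  | some m0 =>
      have h1 := PySem.List.max?_mem hx
      have h2 := PySem.List.max?_isMax hx
      have hEq : m0 = m := le_antisymm (hmax _ h1) (h2 _ hm)
      simp [PySem.List.maxD, hx, hEq]

theorem minD_id_eq {xs : List Int} {m : Int} (d : Int) (hm : m ∈ xs)
    (hmin : ∀ y ∈ xs, m ≤ y) : PySem.List.minD xs (fun x => x) d = m := by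
  cases hx : PySem.List.min? xs (fun x : Int => x) with
  | none =>
      exact absurd ((PySem.List.min?_eq_none_iff _ _).mp hx) (List.ne_nil_of_mem hm)
  | some m0 =>
      have h1 := PySem.List.min?_mem hx
      have h2 := PySem.List.min?_isMin hx
      have hEq : m0 = m := le_antisymm (h2 _ hm) (hmin _ h1)
      simp [PySem.List.minD, hx, hEq]

theorem maxD_perm_id {xs ys : List Int} (d : Int) (hp : xs.Perm ys) :
    PySem.List.maxD xs (fun x => x) d = PySem.List.maxD ys (fun x => x) d := by
  rcases xs with _ | ⟨x, t⟩
  · rw [← hp.nil_eq]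
  · have hm : ∃ m, PySem.List.max? (x :: t) (fun x : Int => x) = some m := by
      cases hx : PySem.List.max? (x :: t) (fun x : Int => x) with
      | none => exact absurd ((PySem.List.max?_eq_none_iff _ _).mp hx) (by simp)
      | some m => exact ⟨m, rfl⟩
    obtain ⟨m, hx⟩ := hm
    have h1 := PySem.List.max?_mem hx
    have h2 := PySem.List.max?_isMax hx
    rw [show PySem.List.maxD (x :: t) (fun x => x) d = m by simp [PySem.List.maxD, hx]]
    exact (maxD_id_eq d (hp.mem_iff.mp h1) (fun y hy => h2 y (hp.mem_iff.mpr hy))).symm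

theorem minD_perm_id {xs ys : List Int} (d : Int) (hp : xs.Perm ys) :
    PySem.List.minD xs (fun x => x) d = PySem.List.minD ys (fun x => x) d := by
  rcases xs with _ | ⟨x, t⟩
  · rw [← hp.nil_eq]
  · have hm : ∃ m, PySem.List.min? (x :: t) (fun x : Int => x) = some m := by
      cases hx : PySem.List.min? (x :: t) (fun x : Int => x) with
      | none => exact absurd ((PySem.List.min?_eq_none_iff _ _).mp hx) (by simp)
      | some m => exact ⟨m, rfl⟩
    obtain ⟨m, hx⟩ := hm
    have h1 := PySem.List.min?_mem hx
    have h2 := PySem.List.min?_isMin hx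
    rw [show PySem.List.minD (x :: t) (fun x => x) d = m by simp [PySem.List.minD, hx]]
    exact (minD_id_eq d (hp.mem_iff.mp h1) (fun y hy => h2 y (hp.mem_iff.mpr hy))).symm

theorem sublist_pair_of_getElem {xs : List Int} {i j : Nat} (hij : i < j) (hj : j < xs.length) :
    [xs[i]'(lt_trans hij hj), xs[j]].Sublist xs := by
  have hi : i < xs.length := lt_trans hij hj
  have h1 : (xs[i] :: xs.drop (i + 1)).Sublist xs := by
    rw [← List.drop_eq_getElem_cons hi]
    exact List.drop_sublist _ _
  have h2 : xs[j] ∈ xs.drop (i + 1) := by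
    have hlt : j - (i + 1) < (xs.drop (i + 1)).length := by
      rw [List.length_drop]; omega
    have : (xs.drop (i + 1))[j - (i + 1)] = xs[j] := by
      rw [List.getElem_drop]
      congr 1
      omega
    rw [← this]
    exact List.getElem_mem _
  exact ((List.cons_sublist_cons).mpr (List.singleton_sublist.mpr h2)).trans h1

theorem getElem_of_sublist_pair : ∀ {xs : List Int} {a b : Int}, [a, b].Sublist xs →
    ∃ i j, ∃ (hi : i < xs.length) (hj : j < xs.length), i < j ∧ a = xs[i] ∧ b = xs[j] := by
  intro xs
  induction xs with
  | nil => intro a b h; simp at h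
  | cons x t ih =>
      intro a b h
      rcases pair_sublist_cons.mp h with ⟨rfl, hb⟩ | hs
      · obtain ⟨j, hj, rfl⟩ := List.mem_iff_getElem.mp hb
        exact ⟨0, j + 1, by simp, by simp; omega, by omega, rfl, by simp⟩
      · obtain ⟨i, j, hi, hj, hij, ha, hb⟩ := ih hs
        exact ⟨i + 1, j + 1, by simp; omega, by simp; omega, by omega,
          by simpa using ha, by simpa using hb⟩

def gapsOf (s : List Int) : List Int := (s.zip s.tail).map (fun p => p.2 - p.1)

theorem mem_gapsOf {s : List Int} {y : Int} :
    y ∈ gapsOf s ↔ ∃ k, ∃ (h : k + 1 < s.length), y = s[k + 1] - s[k] := by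
  unfold gapsOf
  rw [List.mem_map]
  constructor
  · rintro ⟨p, hp, rfl⟩
    obtain ⟨k, hk, hpe⟩ := List.mem_iff_getElem.mp hp
    have hk' : k + 1 < s.length := by
      rw [List.length_zip, List.length_tail] at hk; omega
    refine ⟨k, hk', ?_⟩
    have hpair : p = (s[k]'(by omega), s[k + 1]) := by
      rw [← hpe, List.getElem_zip, List.getElem_tail]
    rw [hpair]
  · rintro ⟨k, hk, rfl⟩
    refine ⟨(s[k]'(by omega), s[k + 1]), ?_, rfl⟩
    rw [List.mem_iff_getElem]
    refine ⟨k, ?_, ?_⟩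
    · rw [List.length_zip, List.length_tail]; omega
    · rw [List.getElem_zip, List.getElem_tail]

theorem min_gap_le_diff {s : List Int} {m : Int}
    (hpair : ∀ (i j : Nat) (hij : i < j) (hj : j < s.length), s[i]'(lt_trans hij hj) ≤ s[j])
    (hm : ∀ y ∈ gapsOf s, m ≤ y) :
    ∀ (j : Nat) (hj : j < s.length) (i : Nat) (hij : i < j), m ≤ s[j] - s[i]'(lt_trans hij hj) := by
  intro j
  induction j with
  | zero => intro _ i hij; omega
  | succ j ihj =>
      intro hj i hij
      rcases Nat.lt_succ_iff_lt_or_eq.mp hij with h | rfl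
      · have h1 := ihj (by omega) i h
        have h2 : s[j]'(by omega) ≤ s[j + 1] := hpair j (j + 1) (by omega) hj
        omega
      · exact hm _ (mem_gapsOf.mpr ⟨i, hj, rfl⟩)

theorem pairFold_prod {σ₁ σ₂ : Type} (f : σ₁ → Int → Int → σ₁) (g : σ₂ → Int → Int → σ₂) :
    ∀ (ms : List Int) (a : σ₁) (b : σ₂),
    pairFold ms (fun st m n => (f st.1 m n, g st.2 m n)) (a, b) = (pairFold ms f a, pairFold ms g b) := by
  intro ms
  induction ms with
  | nil => intro a b; rfl
  | cons x t ih =>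
      intro a b
      show pairFold t _ (t.foldl (fun st y => (f st.1 x y, g st.2 x y)) (a, b)) = _
      rw [PySem.List.foldl_prod_mk (fun s e => f s x e) (fun s e => g s x e)]
      exact ih _ _

theorem A_st_eq (modes : List Int) :
    ((PySem.List.enumerate modes).foldl (fun st p =>
      (PySem.List.enumerate modes).foldl (fun st q =>
        if q.1 ≤ p.1 then st
        else (st.1 + 1, PySem.Set.add (PySem.Set.add st.2 (p.2 + q.2)) |p.2 - q.2|)) st)
      ((0 : Int), (PySem.Set.empty : PySem.Set Int)))
    = (pairFold modes (fun (c : Int) _ _ => c + 1) 0,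
       pairFold modes (fun t m n => PySem.Set.add (PySem.Set.add t (m + n)) |m - n|) PySem.Set.empty) := by
  rw [double_enum_fold (fun st m n =>
    (st.1 + 1, PySem.Set.add (PySem.Set.add st.2 (m + n)) |m - n|)) modes 0]
  exact pairFold_prod (fun c _ _ => c + 1)
    (fun t m n => PySem.Set.add (PySem.Set.add t (m + n)) |m - n|) modes 0 PySem.Set.empty

theorem maxD_nil (d : Int) : PySem.List.maxD ([] : List Int) (fun x => x) d = d := rfl

theorem gapsOf_nil_of_short {s : List Int} (h : s.length ≤ 1) : gapsOf s = [] := by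
  match s, h with
  | [], _ => rfl
  | [x], _ => rfl

-- n_triads: the loop counter is n*(n-1)//2
theorem comp_triads (modes : List Int) :
    pairFold modes (fun (c : Int) _ _ => c + 1) 0
      = PySem.Int.floordiv ((modes.length : Int) * ((modes.length : Int) - 1)) 2 := by
  rw [pairFold_count, PySem.Int.floordiv_eq_ediv_of_pos (by omega)]
  omega

-- forward_max: the pairwise-sum maximum is the sum of the two largest elements
theorem comp_fwd (modes : List Int) :
    PySem.List.maxD (pairL modes (fun a b => a + b)) (fun x => x) 0
      = (if 2 ≤ (modes.length : Int) then
          PySem.List.pyGetD (PySem.List.sorted modes fun x => x) (-1) 0 +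
            PySem.List.pyGetD (PySem.List.sorted modes fun x => x) (-2) 0
        else 0) := by
  by_cases h2 : 2 ≤ modes.length
  · rw [if_pos (by exact_mod_cast h2)]
    have hs : (PySem.List.sorted modes fun x => x).Perm modes := PySem.List.sorted_perm _ _ _
    have hlen : (PySem.List.sorted modes fun x => x).length = modes.length := hs.length_eq
    set s := PySem.List.sorted modes fun x => x with hsdef
    have hL : 2 ≤ s.length := by omega
    rw [PySem.List.pyGetD_neg_ofNat s 1 0 (by omega) (by omega)]
    rw [PySem.List.pyGetD_neg_ofNat s 2 0 (by omega) (by omega)]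
    rw [maxD_perm_id 0 (pairL_perm (fun a b => by ring) hs.symm)]
    have hmem : s[s.length - 2]'(by omega) + s[s.length - 1]'(by omega)
        ∈ pairL s (fun a b => a + b) :=
      mem_pairL.mpr ⟨_, _, sublist_pair_of_getElem (i := s.length - 2) (j := s.length - 1)
        (by omega) (by omega), rfl⟩
    have hbnd : ∀ y ∈ pairL s (fun a b => a + b),
        y ≤ s[s.length - 2]'(by omega) + s[s.length - 1]'(by omega) := by
      intro y hy
      obtain ⟨a, b, hsub, rfl⟩ := mem_pairL.mp hy
      obtain ⟨i, j, hi, hj, hij, rfl, rfl⟩ := getElem_of_sublist_pair hsub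
      have e1 : s[i] ≤ s[s.length - 2]'(by omega) :=
        PySem.List.sorted_id_getElem_mono modes (by omega) (by rw [← hsdef]; omega)
      have e2 : s[j] ≤ s[s.length - 1]'(by omega) :=
        PySem.List.sorted_id_getElem_mono modes (by omega) (by rw [← hsdef]; omega)
      omega
    rw [maxD_id_eq 0 hmem hbnd]
    omega
  · rw [if_neg (by exact_mod_cast h2)]
    rw [pairL_nil_of_short (by omega)]
    exact maxD_nil 0

-- inverse_min: the pairwise |difference| minimum is the minimum adjacent gap of the sorted list
theorem comp_inv (modes : List Int) :
    PySem.List.minD (pairL modes (fun a b => |a - b|)) (fun x => x) 0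
      = PySem.List.minD
          (((PySem.List.sorted modes fun x => x).zip
            (PySem.List.slice (PySem.List.sorted modes fun x => x) (some 1) none)).map
            (fun p => p.2 - p.1)) (fun x => x) 0 := by
  rw [PySem.List.slice_from_one]
  have hs : (PySem.List.sorted modes fun x => x).Perm modes := PySem.List.sorted_perm _ _ _
  have hlen : (PySem.List.sorted modes fun x => x).length = modes.length := hs.length_eq
  set s := PySem.List.sorted modes fun x => x with hsdef
  show PySem.List.minD (pairL modes fun a b => |a - b|) (fun x => x) 0
      = PySem.List.minD (gapsOf s) (fun x => x) 0
  have hmono : ∀ (i j : Nat) (hij : i < j) (hj : j < s.length), s[i]'(lt_trans hij hj) ≤ s[j] := by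
    intro i j hij hj
    exact PySem.List.sorted_id_getElem_mono modes (by omega) (by rw [← hsdef]; omega)
  by_cases h2 : 2 ≤ modes.length
  · have hgne : gapsOf s ≠ [] := by
      have : s[1]'(by omega) - s[0]'(by omega) ∈ gapsOf s := mem_gapsOf.mpr ⟨0, by omega, rfl⟩
      exact List.ne_nil_of_mem this
    obtain ⟨m, hm⟩ : ∃ m, PySem.List.min? (gapsOf s) (fun x : Int => x) = some m := by
      cases hx : PySem.List.min? (gapsOf s) (fun x : Int => x) with
      | none => exact absurd ((PySem.List.min?_eq_none_iff _ _).mp hx) hgne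
      | some m => exact ⟨m, rfl⟩
    have hmmem := PySem.List.min?_mem hm
    have hmmin := PySem.List.min?_isMin hm
    rw [minD_perm_id 0 (pairL_perm (fun a b => abs_sub_comm a b) hs.symm)]
    have habs : ∀ (i j : Nat) (hij : i < j) (hj : j < s.length),
        |s[i]'(lt_trans hij hj) - s[j]| = s[j] - s[i]'(lt_trans hij hj) := by
      intro i j hij hj
      rw [abs_sub_comm, abs_of_nonneg (by have := hmono i j hij hj; omega)]
    have hmem : m ∈ pairL s (fun a b => |a - b|) := by
      obtain ⟨k, hk, rfl⟩ := mem_gapsOf.mp hmmem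
      exact mem_pairL.mpr ⟨_, _, sublist_pair_of_getElem (i := k) (j := k + 1) (by omega) hk,
        (habs k (k + 1) (by omega) hk).symm⟩
    have hbnd : ∀ y ∈ pairL s (fun a b => |a - b|), m ≤ y := by
      intro y hy
      obtain ⟨a, b, hsub, rfl⟩ := mem_pairL.mp hy
      obtain ⟨i, j, hi, hj, hij, rfl, rfl⟩ := getElem_of_sublist_pair hsub
      rw [habs i j hij hj]
      exact min_gap_le_diff hmono hmmin j hj i hij
    rw [minD_id_eq 0 hmem hbnd]
    simp [PySem.List.minD, hm]
  · rw [pairL_nil_of_short (by omega), gapsOf_nil_of_short (by omega)]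

-- n_novel_targets: both pairwise target sets hold the same distinct elements
theorem comp_novel (modes : List Int) :
    ((PySem.List.sorted (PySem.Set.diff
        (pairFold modes (fun t m n => PySem.Set.add (PySem.Set.add t (m + n)) |m - n|)
          PySem.Set.empty)
        (PySem.Set.ofList modes)) (fun x => x)).length : Int)
      = ((PySem.Set.diff
          ((modes.foldl (fun (st : PySem.Set Int × List Int) x =>
            ((st.2).foldl (fun t pp => PySem.Set.add (PySem.Set.add t (pp + x)) |pp - x|) st.1,
              st.2 ++ [x])) ((PySem.Set.empty : PySem.Set Int), ([] : List Int))).1)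
          (PySem.Set.ofList modes)).length : Int) := by
  rw [PySem.List.length_sorted]
  congr 1
  apply List.Perm.length_eq
  rw [List.perm_ext_iff_of_nodup
    (PySem.Set.nodup_diff _ _ (nodup_pairFold_set modes PySem.Set.empty List.nodup_nil))
    (PySem.Set.nodup_diff _ _ (nodup_Bfold modes PySem.Set.empty [] List.nodup_nil))]
  intro y
  rw [PySem.Set.mem_diff, PySem.Set.mem_diff, mem_pairFold_set, mem_Bfold]
  constructor
  · rintro ⟨(h | h), hn⟩
    · exact absurd h (List.not_mem_nil)
    · exact ⟨Or.inr (Or.inr h), hn⟩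
  · rintro ⟨(h | ⟨a, ha, _⟩ | h), hn⟩
    · exact absurd h (List.not_mem_nil)
    · exact absurd ha (List.not_mem_nil)
    · exact ⟨Or.inr h, hn⟩

-- ===== VERDICT (by name: the statement is the Claim_ definition above) =====
theorem triad_statistics_spec : Claim_equal_triad_statistics := by
  intro modes _
  unfold Spec_triad_statistics triad_statistics triad_statistics_alt
  dsimp only
  rw [A_st_eq]
  dsimp only
  rw [flatMap_enum_pairs (fun a b => a + b) modes 0,
      flatMap_enum_pairs (fun a b => |a - b|) modes 0]
  rw [comp_triads, comp_fwd, comp_inv, comp_novel]
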